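-- pv_equiv track=rewrite | github.com/rarjonilla/rarjonilla_TFG | training/genetic/genetic_training_crossover_rl.py | __multi_point_crossover_for_dict
-- ===== SOURCE A (Python) =====
-- from typing import Tuple, List, Optional, Dict
--
-- def __multi_point_crossover_for_dict(dict_1: Dict, dict_2: Dict, multiple_key: bool, crossover_points: List[int]) -> Tuple[Dict, Dict]:
--     d_1 = {}
--     d_2 = {}
--
--     # Construir diccionaris alternanT entre intervals
--     d1_p1 = {k: dict_1[k] for i, k in enumerate(dict_1) if any(crossover_points[j] <= i < crossover_points[j + 1] for j in range(len(crossover_points) - 1) if j % 2 == 0)}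
--     d1_p2 = {k: dict_1[k] for i, k in enumerate(dict_1) if any(crossover_points[j] <= i < crossover_points[j + 1] for j in range(len(crossover_points) - 1) if j % 2 != 0)}
--     d2_p1 = {k: dict_2[k] for i, k in enumerate(dict_2) if any(crossover_points[j] <= i < crossover_points[j + 1] for j in range(len(crossover_points) - 1) if j % 2 == 0)}
--     d2_p2 = {k: dict_2[k] for i, k in enumerate(dict_2) if any(crossover_points[j] <= i < crossover_points[j + 1] for j in range(len(crossover_points) - 1) if j % 2 != 0)}
--
--     d_1.update(d1_p1)
--     d_1.update(d2_p2)
--     d_2.update(d2_p1)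
--     d_2.update(d1_p2)
--
--     # No es eficient
--     # Crear llistes per emmagatzemar els segments
--     # d_1 = []
--     # d_2 = []
--
--     # Inicializar índex del punt de tall
--     # crossover_index = 0
--
--     # for key in sorted(dict_1.keys()):
--         # Verificar si hem arribat a un punt de tall
--         # if multiple_key:
--             # if crossover_index < len(crossover_points) and key[0] >= crossover_points[crossover_index]:
--                 # Alternar diccionaris
--                 # dict_1, dict_2 = dict_2, dict_1
--                 # Incrementar índex del punt de tall
--                 # crossover_index += 1
--         # else:
--             # if crossover_index < len(crossover_points) and key >= crossover_points[crossover_index]: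
--                 # Alternar diccionaris
--                 # dict_1, dict_2 = dict_2, dict_1
--                 # Incrementar índex del punt de tall
--                 # crossover_index += 1
--
--         # Afegir claus a les llistes
--         # if dict_1 is not None:
--             # d_1.append((key, dict_1[key]))
--         # if dict_2 is not None:
--             # d_2.append((key, dict_2[key]))
--
--     return dict(d_1), dict(d_2)
-- ===== SOURCE B (Python) =====
-- def __multi_point_crossover_for_dict(dict_1, dict_2, multiple_key, crossover_points):
--     # Interval coverage via a difference array + prefix sum: O(n + P) instead of
--     # A's per-index scan over all crossover intervals (O(n * P)).
--     def cover(n, parity):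
--         diff = [0] * (n + 1)
--         for j in range(parity, len(crossover_points) - 1, 2):
--             lo = max(crossover_points[j], 0)
--             hi = min(crossover_points[j + 1], n)
--             if lo < hi:
--                 diff[lo] += 1
--                 diff[hi] -= 1
--         flags = []
--         c = 0
--         for d in diff[:n]:
--             c += d
--             flags.append(c > 0)
--         return flags
--
--     n1, n2 = len(dict_1), len(dict_2)
--     e1, o1 = cover(n1, 0), cover(n1, 1)
--     e2, o2 = cover(n2, 0), cover(n2, 1)
--     d_1 = {k: v for (k, v), f in zip(dict_1.items(), e1) if f}
--     d_1.update({k: v for (k, v), f in zip(dict_2.items(), o2) if f})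
--     d_2 = {k: v for (k, v), f in zip(dict_2.items(), e2) if f}
--     d_2.update({k: v for (k, v), f in zip(dict_1.items(), o1) if f})
--     return d_1, d_2
-- ===== Notes on version B (the rewrite author's own statement) =====
-- stated objective: faster
-- what changed: A tests every index against every crossover interval inside four dict comprehensions; B marks each interval once in a difference array and takes prefix sums, giving per-index coverage flags in a single pass.
import Mathlib
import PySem

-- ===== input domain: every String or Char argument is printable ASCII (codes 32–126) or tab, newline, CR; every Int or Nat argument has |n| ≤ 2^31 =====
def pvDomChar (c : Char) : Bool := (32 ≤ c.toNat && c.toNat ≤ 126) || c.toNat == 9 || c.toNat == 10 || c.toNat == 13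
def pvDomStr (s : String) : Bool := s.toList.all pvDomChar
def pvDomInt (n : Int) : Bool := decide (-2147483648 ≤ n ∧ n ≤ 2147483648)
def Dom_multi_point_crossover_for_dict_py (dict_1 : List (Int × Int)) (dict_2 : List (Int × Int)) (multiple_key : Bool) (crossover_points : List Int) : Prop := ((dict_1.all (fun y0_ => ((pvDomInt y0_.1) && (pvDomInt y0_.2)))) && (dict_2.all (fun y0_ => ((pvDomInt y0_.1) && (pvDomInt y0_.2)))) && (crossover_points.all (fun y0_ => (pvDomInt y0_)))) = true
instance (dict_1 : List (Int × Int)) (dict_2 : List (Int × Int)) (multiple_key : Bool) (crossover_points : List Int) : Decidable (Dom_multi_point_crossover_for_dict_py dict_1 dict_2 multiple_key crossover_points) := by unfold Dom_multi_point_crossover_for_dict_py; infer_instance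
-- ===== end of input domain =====

-- B replaces A's per-index scan over all crossover intervals by a difference-array +
-- prefix-sum coverage pass (objective: faster, O(n+P) interval work instead of O(n·P)).

-- ===== PORT A =====
-- `any(cps[j] <= i < cps[j+1] for j in range(len(cps)-1) if j % 2 == r)` (r = 0 even, 1 odd)
def pvAnyA (cps : List Int) (r : Nat) (i : Int) : Bool :=
  (List.range (cps.length - 1)).any (fun j =>
    j % 2 == r && decide (PySem.List.pyGetD cps (j : Int) 0 ≤ i ∧ i < PySem.List.pyGetD cps ((j : Int) + 1) 0))

-- `{k: src[k] for i, k in enumerate(src) if pvAnyA …}`; `src[k]` is a dict lookup, always hit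
def pvComprA (src : List (Int × Int)) (r : Nat) (cps : List Int) : PySem.Dict Int Int :=
  (PySem.List.enumerate src 0).foldl
    (fun d p => if pvAnyA cps r p.1 then d.insert p.2.1 ((PySem.Dict.mk src).getD p.2.1 0) else d)
    PySem.Dict.empty

def multi_point_crossover_for_dict_py (dict_1 : List (Int × Int)) (dict_2 : List (Int × Int)) (multiple_key : Bool) (crossover_points : List Int) : (List (Int × Int)) × (List (Int × Int)) :=
  let d1_p1 := pvComprA dict_1 0 crossover_points
  let d1_p2 := pvComprA dict_1 1 crossover_points
  let d2_p1 := pvComprA dict_2 0 crossover_points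
  let d2_p2 := pvComprA dict_2 1 crossover_points
  -- d_1 = {}; d_1.update(d1_p1) leaves exactly d1_p1, then d_1.update(d2_p2);
  -- dict(d_1) at the return copies the dict unchanged, so it is the items list itself
  let d_1 := d1_p1.update d2_p2.items
  let d_2 := d2_p1.update d1_p2.items
  (d_1.items, d_2.items)

-- ===== PORT B =====
-- difference array + prefix sums: flags[i] = "index i lies in some parity-r interval"
def pvCover (n : Nat) (cps : List Int) (r : Nat) : List Bool :=
  let diff :=
    (PySem.List.pyRange (r : Int) ((cps.length : Int) - 1) 2).foldl
      (fun diff j =>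
        let lo : Int := max (PySem.List.pyGetD cps j 0) 0
        let hi : Int := min (PySem.List.pyGetD cps (j + 1) 0) (n : Int)
        if lo < hi then
          -- diff[lo] += 1; diff[hi] -= 1  (0 ≤ lo < hi ≤ n, so both indices are in range)
          let d1 := diff.set lo.toNat (PySem.List.pyGetD diff lo 0 + 1)
          d1.set hi.toNat (PySem.List.pyGetD d1 hi 0 - 1)
        else diff)
      (List.replicate (n + 1) 0)
  -- c = 0; for d in diff[:n]: c += d; flags.append(c > 0)
  ((PySem.List.slice diff none (some (n : Int))).foldl
    (fun (st : Int × List Bool) d => (st.1 + d, st.2 ++ [decide (st.1 + d > 0)])) (0, [])).2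

-- `{k: v for (k, v), f in zip(src.items(), flags) if f}`
def pvComprB (src : List (Int × Int)) (flags : List Bool) : PySem.Dict Int Int :=
  (src.zip flags).foldl (fun d p => if p.2 then d.insert p.1.1 p.1.2 else d) PySem.Dict.empty

def multi_point_crossover_for_dict_py_alt (dict_1 : List (Int × Int)) (dict_2 : List (Int × Int)) (multiple_key : Bool) (crossover_points : List Int) : (List (Int × Int)) × (List (Int × Int)) :=
  let e1 := pvCover dict_1.length crossover_points 0
  let o1 := pvCover dict_1.length crossover_points 1
  let e2 := pvCover dict_2.length crossover_points 0
  let o2 := pvCover dict_2.length crossover_points 1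
  let d_1 := (pvComprB dict_1 e1).update (pvComprB dict_2 o2).items
  let d_2 := (pvComprB dict_2 e2).update (pvComprB dict_1 o1).items
  (d_1.items, d_2.items)

-- ===== PRECONDITION & SPEC =====
-- Pre_ excludes association lists with duplicate keys: the Python arguments are dicts,
-- whose keys are unique, so no duplicate-key list encodes an actual Python input.
def Pre_multi_point_crossover_for_dict_py (dict_1 : List (Int × Int)) (dict_2 : List (Int × Int)) (multiple_key : Bool) (crossover_points : List Int) : Prop :=
  (dict_1.map Prod.fst).Nodup ∧ (dict_2.map Prod.fst).Nodup
instance (dict_1 : List (Int × Int)) (dict_2 : List (Int × Int)) (multiple_key : Bool) (crossover_points : List Int) : Decidable (Pre_multi_point_crossover_for_dict_py dict_1 dict_2 multiple_key crossover_points) := by unfold Pre_multi_point_crossover_for_dict_py; infer_instance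

def pvWitness_multi_point_crossover_for_dict_py : (List (Int × Int)) × (List (Int × Int)) × Bool × List Int :=
  ([(1, 10), (2, 20), (3, 30)], [(1, 100), (2, 200), (3, 300)], false, [0, 2, 3])

def Spec_multi_point_crossover_for_dict_py (dict_1 : List (Int × Int)) (dict_2 : List (Int × Int)) (multiple_key : Bool) (crossover_points : List Int) (out : (List (Int × Int)) × (List (Int × Int))) : Prop := out = multi_point_crossover_for_dict_py_alt dict_1 dict_2 multiple_key crossover_points
instance (dict_1 : List (Int × Int)) (dict_2 : List (Int × Int)) (multiple_key : Bool) (crossover_points : List Int) (out : (List (Int × Int)) × (List (Int × Int))) : Decidable (Spec_multi_point_crossover_for_dict_py dict_1 dict_2 multiple_key crossover_points out) := by unfold Spec_multi_point_crossover_for_dict_py; infer_instance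

-- ===== CLAIM (what is proved, stated in full; the proofs are below) =====
def Claim_equal_multi_point_crossover_for_dict_py : Prop := ∀ (dict_1 : List (Int × Int)) (dict_2 : List (Int × Int)) (multiple_key : Bool) (crossover_points : List Int), Dom_multi_point_crossover_for_dict_py dict_1 dict_2 multiple_key crossover_points → Pre_multi_point_crossover_for_dict_py dict_1 dict_2 multiple_key crossover_points → Spec_multi_point_crossover_for_dict_py dict_1 dict_2 multiple_key crossover_points (multi_point_crossover_for_dict_py dict_1 dict_2 multiple_key crossover_points)

-- ===== LEMMAS AND PROOFS =====

-- the membership test an interval (cps[j], cps[j+1]) clamped to [0, n) performs at index i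
def pvCondC (n : Nat) (cps : List Int) (i : Nat) (j : Int) : Bool :=
  decide (max (PySem.List.pyGetD cps j 0) 0 ≤ (i : Int) ∧ (i : Int) < min (PySem.List.pyGetD cps (j + 1) 0) (n : Int))

-- the body of pvCover's difference-array loop (the lambda in pvCover, let-expanded)
def pvStep (n : Nat) (cps : List Int) (diff : List Int) (j : Int) : List Int :=
  if max (PySem.List.pyGetD cps j 0) 0 < min (PySem.List.pyGetD cps (j + 1) 0) (n : Int) then
    (diff.set (max (PySem.List.pyGetD cps j 0) 0).toNat
        (PySem.List.pyGetD diff (max (PySem.List.pyGetD cps j 0) 0) 0 + 1)).set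
      (min (PySem.List.pyGetD cps (j + 1) 0) (n : Int)).toNat
      (PySem.List.pyGetD
        (diff.set (max (PySem.List.pyGetD cps j 0) 0).toNat
          (PySem.List.pyGetD diff (max (PySem.List.pyGetD cps j 0) 0) 0 + 1))
        (min (PySem.List.pyGetD cps (j + 1) 0) (n : Int)) 0 - 1)
  else diff

lemma pvStep_length (n : Nat) (cps : List Int) (J : List Int) (diff : List Int) :
    (J.foldl (pvStep n cps) diff).length = diff.length := by
  induction J generalizing diff with
  | nil => rfl
  | cons j J ih =>
    simp only [List.foldl_cons]
    rw [ih]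
    unfold pvStep
    split <;> simp

lemma pv_sum_take_set (d : List Int) (a i : Nat) (x : Int) (ha : a < d.length) :
    ((d.set a (d.getD a 0 + x)).take i).sum = (d.take i).sum + (if a < i then x else 0) := by
  induction d generalizing a i with
  | nil => simp at ha
  | cons h t ih =>
    cases a with
    | zero =>
      cases i with
      | zero => simp
      | succ i => simp [List.getD]; ring
    | succ a =>
      cases i with
      | zero => simp
      | succ i =>
        simp only [List.set_cons_succ, List.getD_cons_succ, List.take_succ_cons, List.sum_cons]
        rw [ih a i (by simpa using ha)]
        rw [if_congr (show (a + 1 < i + 1) ↔ (a < i) by omega) rfl rfl]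
        ring

lemma pv_count_invariant (n : Nat) (cps : List Int) (J : List Int) : ∀ (diff : List Int),
    diff.length = n + 1 → ∀ (i : Nat), i < n →
    ((J.foldl (pvStep n cps) diff).take (i + 1)).sum
      = (diff.take (i + 1)).sum + (J.countP (pvCondC n cps i) : Int) := by
  induction J with
  | nil => intro diff _ i _; simp
  | cons j J ih =>
    intro diff hlen i hi
    simp only [List.foldl_cons, List.countP_cons]
    by_cases hlt : max (PySem.List.pyGetD cps j 0) 0 < min (PySem.List.pyGetD cps (j + 1) 0) (n : Int)
    · have hlo0 : (0:Int) ≤ max (PySem.List.pyGetD cps j 0) 0 := le_max_right _ _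
      have hhi0 : (0:Int) ≤ min (PySem.List.pyGetD cps (j + 1) 0) (n : Int) := le_trans hlo0 (le_of_lt hlt)
      have hstep : pvStep n cps diff j
          = (diff.set (max (PySem.List.pyGetD cps j 0) 0).toNat
              (diff.getD (max (PySem.List.pyGetD cps j 0) 0).toNat 0 + 1)).set
              (min (PySem.List.pyGetD cps (j + 1) 0) (n : Int)).toNat
              ((diff.set (max (PySem.List.pyGetD cps j 0) 0).toNat
                (diff.getD (max (PySem.List.pyGetD cps j 0) 0).toNat 0 + 1)).getD
                (min (PySem.List.pyGetD cps (j + 1) 0) (n : Int)).toNat 0 + (-1)) := by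
        unfold pvStep
        rw [if_pos hlt, PySem.List.pyGetD_of_nonneg _ _ hlo0,
          PySem.List.pyGetD_of_nonneg _ _ hhi0, sub_eq_add_neg]
      have h1 : (max (PySem.List.pyGetD cps j 0) 0).toNat < diff.length := by omega
      have h2 : (min (PySem.List.pyGetD cps (j + 1) 0) (n : Int)).toNat
          < ((diff.set (max (PySem.List.pyGetD cps j 0) 0).toNat
              (diff.getD (max (PySem.List.pyGetD cps j 0) 0).toNat 0 + 1))).length := by
        simp only [List.length_set]; omega
      rw [hstep, ih _ (by simpa using hlen) i hi, pv_sum_take_set _ _ _ _ h2,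
        pv_sum_take_set _ _ _ _ h1]
      unfold pvCondC
      simp only [decide_eq_true_eq]
      push_cast
      split_ifs <;> omega
    · have hstep : pvStep n cps diff j = diff := by unfold pvStep; rw [if_neg hlt]
      have hcond : pvCondC n cps i j = false := by
        unfold pvCondC
        simp only [decide_eq_false_iff_not]
        rintro ⟨ha, hb⟩
        exact hlt (lt_of_le_of_lt ha hb)
      rw [hstep, ih _ hlen i hi, hcond]
      simp

lemma pv_scan (xs : List Int) : ∀ (c0 : Int) (acc : List Bool),
    xs.foldl (fun (st : Int × List Bool) d => (st.1 + d, st.2 ++ [decide (st.1 + d > 0)])) (c0, acc)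
      = (c0 + xs.sum,
          acc ++ (List.range xs.length).map (fun i => decide (c0 + ((xs.take (i + 1)).sum) > 0))) := by
  induction xs with
  | nil => intro c0 acc; simp
  | cons d t ih =>
    intro c0 acc
    simp only [List.foldl_cons]
    rw [ih]
    simp only [List.length_cons, List.range_succ_eq_map, List.map_cons, List.map_map,
      List.sum_cons, List.take_succ_cons, Prod.mk.injEq]
    refine ⟨by ring, ?_⟩
    rw [List.append_assoc, List.singleton_append]
    congr 1
    congr 1
    · simp
    · refine List.map_congr_left (fun i _ => ?_)
      simp only [Function.comp_apply, Nat.succ_eq_add_one, add_assoc]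
      rfl

lemma pv_cover_eq (n : Nat) (cps : List Int) (r : Nat) (hr : r < 2) :
    pvCover n cps r = (List.range n).map (fun i : Nat => pvAnyA cps r (i : Int)) := by
  unfold pvCover
  have hbody : ∀ (diff : List Int) (j : Int),
      (fun diff j =>
        let lo : Int := max (PySem.List.pyGetD cps j 0) 0
        let hi : Int := min (PySem.List.pyGetD cps (j + 1) 0) (n : Int)
        if lo < hi then
          let d1 := diff.set lo.toNat (PySem.List.pyGetD diff lo 0 + 1)
          d1.set hi.toNat (PySem.List.pyGetD d1 hi 0 - 1)
        else diff) diff j = pvStep n cps diff j := fun _ _ => rfl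
  simp only [hbody]
  set J := PySem.List.pyRange (r : Int) ((cps.length : Int) - 1) 2 with hJ
  set final := J.foldl (pvStep n cps) (List.replicate (n + 1) 0) with hfinal
  have hflen : final.length = n + 1 := by
    rw [hfinal, pvStep_length]; simp
  rw [PySem.List.slice_to _ (by positivity), Int.toNat_natCast, pv_scan]
  simp only [List.nil_append, List.length_take, hflen]
  rw [show min n (n + 1) = n by omega]
  apply List.map_congr_left
  intro i hi
  rw [List.mem_range] at hi
  rw [List.take_take, show min (i + 1) n = i + 1 by omega, hfinal,
    pv_count_invariant n cps J _ (by simp) i hi,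
    show ((List.replicate (n + 1) (0 : Int)).take (i + 1)).sum = 0 by rw [List.take_replicate]; simp]
  unfold pvAnyA
  have key : (0 < List.countP (pvCondC n cps i) J) ↔
      ((List.range (cps.length - 1)).any (fun j =>
        j % 2 == r && decide (PySem.List.pyGetD cps (j : Int) 0 ≤ (i : Int) ∧
          (i : Int) < PySem.List.pyGetD cps ((j : Int) + 1) 0)) = true) := by
    rw [List.countP_pos_iff, List.any_eq_true]
    constructor
    · rintro ⟨j, hjmem, hcnd⟩
      rw [hJ, PySem.List.mem_pyRange_iff_of_pos (by norm_num)] at hjmem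
      obtain ⟨hjr, hjlt, hjdvd⟩ := hjmem
      have hj0 : (0:Int) ≤ j := le_trans (Int.natCast_nonneg r) hjr
      unfold pvCondC at hcnd
      rw [decide_eq_true_eq] at hcnd
      have hcast : ((j.toNat : Int)) = j := Int.toNat_of_nonneg hj0
      refine ⟨j.toNat, by rw [List.mem_range]; omega, ?_⟩
      rw [Bool.and_eq_true, beq_iff_eq, decide_eq_true_eq, hcast]
      exact ⟨by omega, by omega, by omega⟩
    · rintro ⟨jn, hjn, hp⟩
      rw [List.mem_range] at hjn
      rw [Bool.and_eq_true, beq_iff_eq, decide_eq_true_eq] at hp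
      obtain ⟨hpar, hle, hlt2⟩ := hp
      refine ⟨(jn : Int), ?_, ?_⟩
      · rw [hJ, PySem.List.mem_pyRange_iff_of_pos (by norm_num)]
        exact ⟨by omega, by omega, by omega⟩
      · unfold pvCondC
        rw [decide_eq_true_eq]
        exact ⟨max_le hle (Int.natCast_nonneg i), lt_min hlt2 (by exact_mod_cast hi)⟩
  simp only [zero_add, gt_iff_lt, Int.natCast_pos]
  by_cases hp : 0 < List.countP (pvCondC n cps i) J
  · rw [key.mp hp]
    simpa using hp
  · have h2 : ((List.range (cps.length - 1)).any (fun j =>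
        j % 2 == r && decide (PySem.List.pyGetD cps (j : Int) 0 ≤ (i : Int) ∧
          (i : Int) < PySem.List.pyGetD cps ((j : Int) + 1) 0))) = false := by
      rw [← Bool.not_eq_true]
      exact fun h => hp (key.mpr h)
    rw [h2]
    simpa using hp

lemma pv_compr_eq (src : List (Int × Int)) (cps : List Int) (r : Nat) (hr : r < 2)
    (hnd : (src.map Prod.fst).Nodup) :
    pvComprA src r cps = pvComprB src (pvCover src.length cps r) := by
  unfold pvComprA pvComprB
  rw [pv_cover_eq _ _ _ hr, PySem.List.enumerate_eq_zipIdx_map, List.foldl_map,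
    List.zip_map_right, List.foldl_map, List.zipIdx_eq_zip_range', ← List.range_eq_range']
  apply PySem.List.foldl_congr_mem
  intro acc p hp
  obtain ⟨x, i⟩ := p
  have hmem : (x, i) ∈ src.zip (List.range src.length) := hp
  have hxmem : x ∈ src := (List.of_mem_zip hmem).1
  simp only [Prod.map, id, zero_add]
  have hval : (PySem.Dict.mk src).getD x.1 0 = x.2 :=
    PySem.Dict.getD_of_mem_items _ (show (x.1, x.2) ∈ (PySem.Dict.mk src).items by simpa using hxmem)
      (by simpa [PySem.Dict.keys] using hnd) 0
  rw [hval]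

-- ===== VERDICT (by name: the statement is the Claim_ definition above) =====
theorem multi_point_crossover_for_dict_py_spec : Claim_equal_multi_point_crossover_for_dict_py := by
  intro d1 d2 mk cps _ hpre
  obtain ⟨h1, h2⟩ := hpre
  show _ = _
  unfold multi_point_crossover_for_dict_py multi_point_crossover_for_dict_py_alt
  rw [pv_compr_eq d1 cps 0 (by omega) h1, pv_compr_eq d1 cps 1 (by omega) h1,
    pv_compr_eq d2 cps 0 (by omega) h2, pv_compr_eq d2 cps 1 (by omega) h2]
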